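-- pv_equiv track=rewrite | github.com/stephenszpak/devteam-ai | agents/frontend_coder.py | _determine_file_extension
-- ===== SOURCE A (Python) =====
-- def _determine_file_extension(code_content: str) -> str:
--     """Determine appropriate file extension based on code content"""
--     content_lower = code_content.lower()
--
--     if 'interface' in content_lower and ('react' in content_lower or 'jsx' in content_lower):
--         return '.tsx'
--     elif 'react' in content_lower or 'jsx' in content_lower or 'usestate' in content_lower:
--         return '.jsx'
--     elif 'typescript' in content_lower or ': string' in content_lower or ': number' in content_lower:
--         return '.ts'
--     elif any(css_indicator in content_lower for css_indicator in ['@apply', 'background:', 'color:', 'margin:', 'padding:']):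
--         return '.css'
--     elif '.scss' in content_lower or '@mixin' in content_lower:
--         return '.scss'
--     elif 'test' in content_lower or 'describe(' in content_lower:
--         return '.test.js'
--     else:
--         return '.jsx'  # Default for React components
-- ===== SOURCE B (Python) =====
-- def _determine_file_extension(code_content: str) -> str:
--     """Determine appropriate file extension based on code content"""
--     c = code_content.lower()
--     tokens = ['interface', 'react', 'jsx', 'usestate', 'typescript', ': string',
--               ': number', '@apply', 'background:', 'color:', 'margin:', 'padding:',
--               '.scss', '@mixin', 'test', 'describe(']
--     found = {t for t in tokens if t in c}
--     rules = [
--         ({'interface'}, {'react', 'jsx'}, '.tsx'),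
--         (set(), {'react', 'jsx', 'usestate'}, '.jsx'),
--         (set(), {'typescript', ': string', ': number'}, '.ts'),
--         (set(), {'@apply', 'background:', 'color:', 'margin:', 'padding:'}, '.css'),
--         (set(), {'.scss', '@mixin'}, '.scss'),
--         (set(), {'test', 'describe('}, '.test.js'),
--     ]
--     for need_all, need_any, ext in rules:
--         if need_all <= found and found & need_any:
--             return ext
--     return '.jsx'  # Default for React components
-- ===== Notes on version B (the rewrite author's own statement) =====
-- stated objective: alternative
-- what changed: Replaces A's hard-coded if/elif chain by a data-driven design: one scan builds the set of keyword tokens found in the lowered content, then an ordered rule table of (required-all, required-any, extension) triples is searched for the first matching rule.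
import Mathlib
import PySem

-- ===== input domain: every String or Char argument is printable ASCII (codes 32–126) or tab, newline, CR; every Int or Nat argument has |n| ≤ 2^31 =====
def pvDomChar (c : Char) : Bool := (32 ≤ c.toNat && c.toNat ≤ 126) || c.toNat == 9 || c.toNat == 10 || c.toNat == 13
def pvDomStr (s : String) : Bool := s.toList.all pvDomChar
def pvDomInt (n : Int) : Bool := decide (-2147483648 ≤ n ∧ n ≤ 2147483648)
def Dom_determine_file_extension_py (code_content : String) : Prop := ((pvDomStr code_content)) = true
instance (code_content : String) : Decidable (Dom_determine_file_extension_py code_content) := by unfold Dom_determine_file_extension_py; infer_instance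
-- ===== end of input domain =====

-- B replaces A's if/elif chain by a data-driven rule table (one token scan + first-matching-rule lookup); same results, different decomposition.
-- ===== PORT A =====
def determine_file_extension_py (code_content : String) : String :=
  let content_lower := PySem.Str.lower code_content
  if PySem.Str.isIn "interface" content_lower &&
      (PySem.Str.isIn "react" content_lower || PySem.Str.isIn "jsx" content_lower) then
    ".tsx"
  else if PySem.Str.isIn "react" content_lower || PySem.Str.isIn "jsx" content_lower ||
      PySem.Str.isIn "usestate" content_lower then
    ".jsx"
  else if PySem.Str.isIn "typescript" content_lower || PySem.Str.isIn ": string" content_lower ||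
      PySem.Str.isIn ": number" content_lower then
    ".ts"
  else if ["@apply", "background:", "color:", "margin:", "padding:"].any
      (fun css_indicator => PySem.Str.isIn css_indicator content_lower) then
    ".css"
  else if PySem.Str.isIn ".scss" content_lower || PySem.Str.isIn "@mixin" content_lower then
    ".scss"
  else if PySem.Str.isIn "test" content_lower || PySem.Str.isIn "describe(" content_lower then
    ".test.js"
  else
    ".jsx"

-- ===== PORT B =====
-- B-side helpers: the token list, the ordered rule table, and first-matching-rule lookup
def dfeTokens : List String :=
  ["interface", "react", "jsx", "usestate", "typescript", ": string",
   ": number", "@apply", "background:", "color:", "margin:", "padding:",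
   ".scss", "@mixin", "test", "describe("]

def dfeRules : List (List String × List String × String) :=
  [(["interface"], ["react", "jsx"], ".tsx"),
   ([], ["react", "jsx", "usestate"], ".jsx"),
   ([], ["typescript", ": string", ": number"], ".ts"),
   ([], ["@apply", "background:", "color:", "margin:", "padding:"], ".css"),
   ([], [".scss", "@mixin"], ".scss"),
   ([], ["test", "describe("], ".test.js")]

def dfeFirstMatch (found : PySem.Set String) : List (List String × List String × String) → String
  | [] => ".jsx"
  | (need_all, need_any, ext) :: rest =>
    if need_all.all (fun t => found.contains t) && need_any.any (fun t => found.contains t) then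
      ext
    else
      dfeFirstMatch found rest

def determine_file_extension_py_alt (code_content : String) : String :=
  let c := PySem.Str.lower code_content
  let found := PySem.Set.ofList (dfeTokens.filter (fun t => PySem.Str.isIn t c))
  dfeFirstMatch found dfeRules

-- ===== PRECONDITION & SPEC =====
def Spec_determine_file_extension_py (code_content : String) (out : String) : Prop := out = determine_file_extension_py_alt code_content
instance (code_content : String) (out : String) : Decidable (Spec_determine_file_extension_py code_content out) := by unfold Spec_determine_file_extension_py; infer_instance

-- ===== CLAIM (what is proved, stated in full; the proofs are below) =====
def Claim_equal_determine_file_extension_py : Prop := ∀ (code_content : String), Dom_determine_file_extension_py code_content → Spec_determine_file_extension_py code_content (determine_file_extension_py code_content)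

-- ===== LEMMAS AND PROOFS =====

-- ===== VERDICT (by name: the statement is the Claim_ definition above) =====
lemma dfe_contains (p : String → Bool) (t : String) (ht : t ∈ dfeTokens) :
    (PySem.Set.ofList (dfeTokens.filter p)).contains t = p t := by
  cases hp : p t
  · have : t ∉ PySem.Set.ofList (dfeTokens.filter p) := by
      rw [PySem.Set.mem_ofList, List.mem_filter]
      exact fun h => by simp [hp] at h
    simpa [PySem.Set.contains_eq_listContains] using this
  · have : t ∈ PySem.Set.ofList (dfeTokens.filter p) := by
      rw [PySem.Set.mem_ofList, List.mem_filter]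
      exact ⟨ht, hp⟩
    simpa [PySem.Set.contains_eq_listContains] using this

theorem determine_file_extension_py_spec : Claim_equal_determine_file_extension_py := by
  intro code_content _
  unfold Spec_determine_file_extension_py determine_file_extension_py determine_file_extension_py_alt
  simp only [dfeRules, dfeFirstMatch, List.all, List.any,
    dfe_contains _ _ (by decide : "interface" ∈ dfeTokens),
    dfe_contains _ _ (by decide : "react" ∈ dfeTokens),
    dfe_contains _ _ (by decide : "jsx" ∈ dfeTokens),
    dfe_contains _ _ (by decide : "usestate" ∈ dfeTokens),
    dfe_contains _ _ (by decide : "typescript" ∈ dfeTokens),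
    dfe_contains _ _ (by decide : ": string" ∈ dfeTokens),
    dfe_contains _ _ (by decide : ": number" ∈ dfeTokens),
    dfe_contains _ _ (by decide : "@apply" ∈ dfeTokens),
    dfe_contains _ _ (by decide : "background:" ∈ dfeTokens),
    dfe_contains _ _ (by decide : "color:" ∈ dfeTokens),
    dfe_contains _ _ (by decide : "margin:" ∈ dfeTokens),
    dfe_contains _ _ (by decide : "padding:" ∈ dfeTokens),
    dfe_contains _ _ (by decide : ".scss" ∈ dfeTokens),
    dfe_contains _ _ (by decide : "@mixin" ∈ dfeTokens),
    dfe_contains _ _ (by decide : "test" ∈ dfeTokens),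
    dfe_contains _ _ (by decide : "describe(" ∈ dfeTokens),
    Bool.or_false, Bool.and_true, Bool.true_and, Bool.or_assoc]
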